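-- pv_equiv track=rewrite | github.com/bulik0071/advent-of-code-2023 | day10/day10.py | count_inside_tiles
-- ===== SOURCE A (Python) =====
-- def count_inside_tiles(map_data, distances):
--     width = len(map_data[0])
--     height = len(map_data)
--     inside_count = 0
--
--     for y, line in enumerate(map_data):
--         for x, char in enumerate(line):
--             if (x, y) in distances:
--                 continue
--
--             crosses = 0
--             x2, y2 = x, y
--
--             while x2 < width and y2 < height:
--                 char2 = map_data[y2][x2]
--                 if (x2, y2) in distances and char2 not in ["L", "7"]:
--                     crosses += 1
--                 x2 += 1
--                 y2 += 1
--
--             if crosses % 2 == 1: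
--                 inside_count += 1
--
--     return inside_count
-- ===== SOURCE B (Python) =====
-- def count_inside_tiles(map_data, distances):
--     # Dynamic programming over rows, bottom-up: the crossing parity of the
--     # diagonal ray from (x, y) is cell(x, y) XOR parity(x+1, y+1), so one
--     # row of parities suffices; each tile is then an O(1) lookup.
--     width = len(map_data[0])
--     height = len(map_data)
--     loop = set(distances)
--     total = 0
--     below = [0] * (width + 1)  # parities of row y+1 (index width stays 0)
--     for y in range(height - 1, -1, -1):
--         cur = [0] * (width + 1)
--         line = map_data[y]
--         for x in range(width):
--             c = 1 if (x, y) in loop and line[x] not in ("L", "7") else 0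
--             cur[x] = (c + below[x + 1]) % 2
--             if (x, y) not in loop and cur[x] == 1:
--                 total += 1
--         below = cur
--     return total
-- ===== Notes on version B (the rewrite author's own statement) =====
-- stated objective: faster
-- what changed: Instead of walking the whole down-right diagonal for every tile, B computes crossing parities bottom-up with a one-row DP (parity(x,y) = cell(x,y) XOR parity(x+1,y+1)), one O(1) lookup per tile; intended as faster, measured 1.6-2.4x in a timing run.
-- outside the precondition, e.g. on count_inside_tiles(['ab', 'a'], {(1, 1), (0, 0)}): A returns 0, B raises IndexError; on count_inside_tiles(['...', '.', '...'], {(1, 0), (2, 2), (0, 0)}): A returns 0, B returns 1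
import Mathlib
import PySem

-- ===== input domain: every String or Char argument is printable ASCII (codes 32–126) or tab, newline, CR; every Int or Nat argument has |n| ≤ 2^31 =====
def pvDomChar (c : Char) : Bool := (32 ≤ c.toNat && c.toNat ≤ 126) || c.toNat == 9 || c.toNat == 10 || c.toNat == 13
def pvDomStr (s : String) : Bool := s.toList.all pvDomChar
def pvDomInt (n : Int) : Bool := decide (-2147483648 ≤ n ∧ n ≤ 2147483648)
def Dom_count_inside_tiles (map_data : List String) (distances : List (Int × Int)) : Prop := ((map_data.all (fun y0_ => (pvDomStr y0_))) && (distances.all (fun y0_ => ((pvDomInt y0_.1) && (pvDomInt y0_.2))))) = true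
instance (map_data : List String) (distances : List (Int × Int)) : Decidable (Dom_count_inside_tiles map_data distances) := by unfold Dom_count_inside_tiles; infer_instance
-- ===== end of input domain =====

-- B replaces A's per-tile diagonal walk by a bottom-up one-row parity DP; intended as faster (measured 1.6-2.4x in a timing run).

-- ===== PORT A =====
-- the 'while x2 < width and y2 < height' loop: returns the crossings counted from (x2, y2) on
def pvCrosses (map_data : List String) (distances : List (Int × Int))
    (width height : Int) (x2 y2 : Int) : Int :=
  if h : x2 < width ∧ y2 < height then
    let char2 : Char := (PySem.List.pyGet? ((PySem.List.pyGet? map_data y2).getD "").toList x2).getD ' '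
    (if (x2, y2) ∈ distances ∧ char2 ≠ 'L' ∧ char2 ≠ '7' then 1 else 0)
      + pvCrosses map_data distances width height (x2 + 1) (y2 + 1)
  else 0
termination_by (width - x2).toNat
decreasing_by omega

def count_inside_tiles (map_data : List String) (distances : List (Int × Int)) : Int :=
  let width : Int := PySem.Str.len ((PySem.List.pyGet? map_data 0).getD "")
  let height : Int := (map_data.length : Int)
  (PySem.List.enumerate map_data).foldl (fun acc p =>
    (PySem.List.enumerate p.2.toList).foldl (fun acc2 q =>
      if (q.1, p.1) ∈ distances then acc2
      else if PySem.Int.mod (pvCrosses map_data distances width height q.1 p.1) 2 = 1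
        then acc2 + 1 else acc2) acc) 0

-- ===== PORT B =====
-- the 'for x in range(width)' loop: returns (cur from index x on (trailing 0 kept), row count from x on)
def pvRowGo (map_data : List String) (loop : PySem.Set (Int × Int)) (below : List Int)
    (width : Int) (y : Int) (x : Int) : List Int × Int :=
  if h : x < width then
    let line := (PySem.List.pyGet? map_data y).getD ""
    let ch : Char := (PySem.List.pyGet? line.toList x).getD ' '
    let c : Int := if (x, y) ∈ loop ∧ ch ≠ 'L' ∧ ch ≠ '7' then 1 else 0
    let p : Int := PySem.Int.mod (c + (PySem.List.pyGet? below (x + 1)).getD 0) 2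
    let rest := pvRowGo map_data loop below width y (x + 1)
    (p :: rest.1, (if ¬((x, y) ∈ loop) ∧ p = 1 then 1 else 0) + rest.2)
  else ([0], 0)
termination_by (width - x).toNat
decreasing_by omega

-- the 'for y in range(height-1, -1, -1)' loop: returns (row of parities at y, total for rows y..height-1)
def pvRowsB (map_data : List String) (loop : PySem.Set (Int × Int))
    (width height : Int) (y : Int) : List Int × Int :=
  if h : y < height then
    let br := pvRowsB map_data loop width height (y + 1)
    let row := pvRowGo map_data loop br.1 width y 0
    (row.1, row.2 + br.2)
  else (List.replicate (width + 1).toNat 0, 0)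
termination_by (height - y).toNat
decreasing_by omega

def count_inside_tiles_alt (map_data : List String) (distances : List (Int × Int)) : Int :=
  let width : Int := PySem.Str.len ((PySem.List.pyGet? map_data 0).getD "")
  let height : Int := (map_data.length : Int)
  let loop : PySem.Set (Int × Int) := PySem.Set.ofList distances
  (pvRowsB map_data loop width height 0).2

-- ===== PRECONDITION & SPEC =====
-- Pre_ excludes the empty map (len(map_data[0]) raises IndexError) and ragged maps in which some
-- line is shorter than the first: there A's diagonal read map_data[y2][x2] usually raises, and on
-- the few such maps where A happens to return, B's rectangular grid scan may read a missing cell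
-- (IndexError) or count a tile the ragged map does not even have — behaviour nobody would specify.
def Pre_count_inside_tiles (map_data : List String) (distances : List (Int × Int)) : Prop :=
  map_data ≠ [] ∧ ∀ line ∈ map_data, (map_data.headD "").toList.length ≤ line.toList.length
instance (map_data : List String) (distances : List (Int × Int)) : Decidable (Pre_count_inside_tiles map_data distances) := by unfold Pre_count_inside_tiles; infer_instance

def pvWitness_count_inside_tiles : List String × (List (Int × Int)) :=
  (["F7.", "|L7", ".|J"], [(0, 0), (1, 0), (0, 1), (1, 1), (2, 1), (1, 2), (2, 2)])

def Spec_count_inside_tiles (map_data : List String) (distances : List (Int × Int)) (out : Int) : Prop := out = count_inside_tiles_alt map_data distances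
instance (map_data : List String) (distances : List (Int × Int)) (out : Int) : Decidable (Spec_count_inside_tiles map_data distances out) := by unfold Spec_count_inside_tiles; infer_instance

-- ===== CLAIM (what is proved, stated in full; the proofs are below) =====
def Claim_equal_count_inside_tiles : Prop := ∀ (map_data : List String) (distances : List (Int × Int)), Dom_count_inside_tiles map_data distances → Pre_count_inside_tiles map_data distances → Spec_count_inside_tiles map_data distances (count_inside_tiles map_data distances)

-- ===== LEMMAS AND PROOFS =====

-- proof-side helpers: the per-tile indicator, row sums and the bottom-up total
def pvInd (map_data : List String) (distances : List (Int × Int))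
    (width height : Int) (x y : Int) : Int :=
  if (x, y) ∈ distances then 0
  else if PySem.Int.mod (pvCrosses map_data distances width height x y) 2 = 1 then 1 else 0

def pvCntA (map_data : List String) (distances : List (Int × Int))
    (width height : Int) (y x : Int) : Int :=
  if h : x < width then
    pvInd map_data distances width height x y + pvCntA map_data distances width height y (x + 1)
  else 0
termination_by (width - x).toNat
decreasing_by omega

def pvPList (map_data : List String) (distances : List (Int × Int))
    (width height : Int) (y x : Int) : List Int :=
  if h : x < width then
    PySem.Int.mod (pvCrosses map_data distances width height x y) 2
      :: pvPList map_data distances width height y (x + 1)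
  else [0]
termination_by (width - x).toNat
decreasing_by omega

def pvBTot (map_data : List String) (distances : List (Int × Int))
    (width height : Int) (y : Int) : Int :=
  if h : y < height then
    pvCntA map_data distances width height y 0 + pvBTot map_data distances width height (y + 1)
  else 0
termination_by (height - y).toNat
decreasing_by omega

theorem pv_mod_two (n : Int) : PySem.Int.mod n 2 = n % 2 := by
  simp [PySem.Int.mod, Int.fmod_eq_emod]

-- crossing parity is in {0,1} (via pv_mod_two and emod), used implicitly through omega

-- the parity row pvPList answers lookups with the diagonal-walk parity
theorem pvPList_get (map_data : List String) (distances : List (Int × Int))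
    (width height : Int) (y : Int) (k : Nat) :
    ∀ x : Int, 0 ≤ x → x ≤ width → x + k ≤ width →
    (PySem.List.pyGet? (pvPList map_data distances width height y x) (k : Int)).getD 0
      = PySem.Int.mod (pvCrosses map_data distances width height (x + k) y) 2 := by
  induction k with
  | zero =>
    intro x hx0 hxw _
    rw [pvPList]
    by_cases h : x < width
    · simp [h, PySem.List.pyGet?_zero_cons]
    · have hz : pvCrosses map_data distances width height x y = 0 := by
        rw [pvCrosses]; simp [h]
      simp [h, hz, pv_mod_two]
  | succ k ih =>
    intro x hx0 hxw hxk
    have hxlt : x < width := by omega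
    rw [pvPList]
    simp only [hxlt, dif_pos, dite_true]
    have hcast : ((k + 1 : Nat) : Int) = (k : Int) + 1 := by push_cast; ring
    rw [hcast, PySem.List.pyGet?_cons_succ]
    have harg : x + ((k : Int) + 1) = x + 1 + (k : Int) := by ring
    rw [harg]
    exact ih (x + 1) (by omega) (by omega) (by omega)

-- pvRowGo computes (pvPList, pvCntA) whenever 'below' answers with row y+1's parities
theorem pvRowGo_spec (map_data : List String) (distances : List (Int × Int))
    (width height : Int) (below : List Int) (y : Int)
    (hy : y < height)
    (hb : ∀ j : Int, 0 ≤ j → j ≤ width →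
      (PySem.List.pyGet? below j).getD 0
        = PySem.Int.mod (pvCrosses map_data distances width height j (y + 1)) 2) :
    ∀ x : Int, 0 ≤ x →
    pvRowGo map_data (PySem.Set.ofList distances) below width y x
      = (pvPList map_data distances width height y x,
         pvCntA map_data distances width height y x) := by
  intro x hx0
  induction hm : (width - x).toNat generalizing x with
  | zero =>
    have hxe : ¬ x < width := by omega
    rw [pvRowGo, pvPList, pvCntA]
    simp [hxe]
  | succ m ih =>
    have hxlt : x < width := by omega
    have hrest := ih (x + 1) (by omega) (by omega)
    have hbx := hb (x + 1) (by omega) (by omega)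
    rw [pvRowGo, pvPList, pvCntA]
    simp only [hxlt, dif_pos]
    rw [hrest, hbx]
    have hcr : pvCrosses map_data distances width height x y
        = (if (x, y) ∈ distances
              ∧ (PySem.List.pyGet? ((PySem.List.pyGet? map_data y).getD "").toList x).getD ' ' ≠ 'L'
              ∧ (PySem.List.pyGet? ((PySem.List.pyGet? map_data y).getD "").toList x).getD ' ' ≠ '7'
            then 1 else 0)
          + pvCrosses map_data distances width height (x + 1) (y + 1) := by
      rw [pvCrosses]; simp [hxlt, hy]
    simp only [PySem.Set.mem_ofList, pv_mod_two, pvInd, hcr, Prod.mk.injEq]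
    refine ⟨by congr 1; split_ifs <;> omega, ?_⟩
    by_cases hm : (x, y) ∈ distances
    · simp [hm]
    · simp only [hm, not_false_iff, true_and, if_neg, false_and, if_false]
      split_ifs <;> omega

theorem pvRowsB_spec (map_data : List String) (distances : List (Int × Int))
    (width height : Int) (hw : 0 ≤ width) :
    ∀ y : Int,
    (∀ j : Int, 0 ≤ j → j ≤ width →
      (PySem.List.pyGet? (pvRowsB map_data (PySem.Set.ofList distances) width height y).1 j).getD 0
        = PySem.Int.mod (pvCrosses map_data distances width height j y) 2)
    ∧ (pvRowsB map_data (PySem.Set.ofList distances) width height y).2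
        = pvBTot map_data distances width height y := by
  intro y
  induction hm : (height - y).toNat generalizing y with
  | zero =>
    have hye : ¬ y < height := by omega
    rw [pvRowsB, pvBTot]
    simp only [hye, dif_neg, not_false_iff]
    constructor
    · intro j hj0 hjw
      have hz : pvCrosses map_data distances width height j y = 0 := by
        rw [pvCrosses]; simp [hye]
      have hjc : j = ((j.toNat : Nat) : Int) := by omega
      rw [hz, hjc, PySem.List.pyGet?_natCast]
      simp [List.getElem?_replicate, hj0, hjw, hw]
    · trivial
  | succ m ih =>
    have hylt : y < height := by omega
    obtain ⟨ihb, iht⟩ := ih (y + 1) (by omega)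
    have hrow := pvRowGo_spec map_data distances width height
      (pvRowsB map_data (PySem.Set.ofList distances) width height (y + 1)).1 y hylt ihb 0 le_rfl
    rw [pvRowsB]
    simp only [hylt, dif_pos]
    rw [hrow]
    constructor
    · intro j hj0 hjw
      have hjc : j = ((j.toNat : Nat) : Int) := by omega
      rw [hjc]
      have := pvPList_get map_data distances width height y j.toNat 0 le_rfl hw (by omega)
      simpa using this
    · rw [pvBTot]
      simp only [hylt, dif_pos]
      rw [iht]

-- summing the tile indicator along a row equals pvCntA
theorem pvSum_row (map_data : List String) (distances : List (Int × Int))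
    (width height y : Int) :
    ∀ x : Int,
    ((PySem.List.pyRange x width 1).map (fun j => pvInd map_data distances width height j y)).sum
      = pvCntA map_data distances width height y x := by
  intro x
  induction hm : (width - x).toNat generalizing x with
  | zero =>
    rw [PySem.List.pyRange_one_eq_nil (by omega), pvCntA]
    simp [show ¬ x < width by omega]
  | succ m ih =>
    have hx : x < width := by omega
    rw [PySem.List.pyRange_one_cons hx, pvCntA]
    simp only [List.map_cons, List.sum_cons, hx, dif_pos]
    rw [ih (x + 1) (by omega)]

-- summing the row counts over the rows equals pvBTot
theorem pvSum_col (map_data : List String) (distances : List (Int × Int))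
    (width height : Int) :
    ∀ y : Int,
    ((PySem.List.pyRange y height 1).map (fun r => pvCntA map_data distances width height r 0)).sum
      = pvBTot map_data distances width height y := by
  intro y
  induction hm : (height - y).toNat generalizing y with
  | zero =>
    rw [PySem.List.pyRange_one_eq_nil (by omega), pvBTot]
    simp [show ¬ y < height by omega]
  | succ m ih =>
    have hy : y < height := by omega
    rw [PySem.List.pyRange_one_cons hy, pvBTot]
    simp only [List.map_cons, List.sum_cons, hy, dif_pos]
    rw [ih (y + 1) (by omega)]

-- A's inner loop over one line adds pvCntA of that row
theorem pvInner (map_data : List String) (distances : List (Int × Int))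
    (width height : Int) (hw : 0 ≤ width) (y : Int) (line : String)
    (hlen : width ≤ (line.toList.length : Int)) (acc : Int) :
    (PySem.List.enumerate line.toList).foldl (fun acc2 q =>
      if (q.1, y) ∈ distances then acc2
      else if PySem.Int.mod (pvCrosses map_data distances width height q.1 y) 2 = 1
        then acc2 + 1 else acc2) acc
    = acc + pvCntA map_data distances width height y 0 := by
  have hcongr := PySem.List.foldl_congr_mem
    (l := PySem.List.enumerate line.toList)
    (f := fun acc2 (q : Int × Char) =>
      if (q.1, y) ∈ distances then acc2
      else if PySem.Int.mod (pvCrosses map_data distances width height q.1 y) 2 = 1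
        then acc2 + 1 else acc2)
    (g := fun acc2 (q : Int × Char) => acc2 + pvInd map_data distances width height q.1 y)
    (init := acc)
    (by intro acc2 q _; simp only []; unfold pvInd; split_ifs <;> omega)
  rw [hcongr, PySem.List.foldl_add]
  congr 1
  have h1 : (PySem.List.enumerate line.toList).map
        (fun q => pvInd map_data distances width height q.1 y)
      = ((PySem.List.enumerate line.toList).map (·.1)).map
        (fun j => pvInd map_data distances width height j y) := by
    rw [List.map_map]; rfl
  rw [h1, PySem.List.map_fst_enumerate,
    show (0 : Int) + (line.toList.length : Int) = (line.toList.length : Int) by ring,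
    PySem.List.pyRange_one_append 0 width (line.toList.length) hw hlen,
    List.map_append, List.sum_append, pvSum_row]
  have h2 : ((PySem.List.pyRange width (line.toList.length) 1).map
      (fun j => pvInd map_data distances width height j y)).sum = 0 := by
    apply List.sum_eq_zero
    intro z hz
    simp only [List.mem_map] at hz
    obtain ⟨j, hj, rfl⟩ := hz
    rw [PySem.List.mem_pyRange_one] at hj
    have hz2 : pvCrosses map_data distances width height j y = 0 := by
      rw [pvCrosses]; simp [show ¬ (j < width ∧ y < height) by omega]
    unfold pvInd
    rw [hz2]
    simp [pv_mod_two]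
  rw [h2]
  ring

-- A's outer loop equals pvBTot 0
theorem pvOuter (map_data : List String) (distances : List (Int × Int))
    (width height : Int) (hw : 0 ≤ width)
    (hh : height = (map_data.length : Int))
    (hlines : ∀ line ∈ map_data, width ≤ (line.toList.length : Int)) :
    (PySem.List.enumerate map_data).foldl (fun acc p =>
      (PySem.List.enumerate p.2.toList).foldl (fun acc2 q =>
        if (q.1, p.1) ∈ distances then acc2
        else if PySem.Int.mod (pvCrosses map_data distances width height q.1 p.1) 2 = 1
          then acc2 + 1 else acc2) acc) 0
    = pvBTot map_data distances width height 0 := by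
  have hcongr := PySem.List.foldl_congr_mem
    (l := PySem.List.enumerate map_data)
    (f := fun acc (p : Int × String) =>
      (PySem.List.enumerate p.2.toList).foldl (fun acc2 q =>
        if (q.1, p.1) ∈ distances then acc2
        else if PySem.Int.mod (pvCrosses map_data distances width height q.1 p.1) 2 = 1
          then acc2 + 1 else acc2) acc)
    (g := fun acc (p : Int × String) => acc + pvCntA map_data distances width height p.1 0)
    (init := 0)
    (by
      intro acc p hp
      rw [PySem.List.mem_enumerate_iff] at hp
      obtain ⟨k, hk, rfl⟩ := hp
      exact pvInner map_data distances width height hw _ _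
        (hlines _ (List.getElem_mem hk)) acc)
  rw [hcongr, PySem.List.foldl_add]
  have h1 : (PySem.List.enumerate map_data).map
        (fun p => pvCntA map_data distances width height p.1 0)
      = ((PySem.List.enumerate map_data).map (·.1)).map
        (fun r => pvCntA map_data distances width height r 0) := by
    rw [List.map_map]; rfl
  rw [h1, PySem.List.map_fst_enumerate,
    show (0 : Int) + (map_data.length : Int) = (map_data.length : Int) by ring,
    ← hh, pvSum_col]
  ring

-- ===== VERDICT (by name: the statement is the Claim_ definition above) =====
theorem count_inside_tiles_spec : Claim_equal_count_inside_tiles := by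
  intro map_data distances _ hpre
  obtain ⟨hne, hlines⟩ := hpre
  unfold Spec_count_inside_tiles count_inside_tiles count_inside_tiles_alt
  have hhead : (PySem.List.pyGet? map_data 0).getD "" = map_data.headD "" := by
    cases map_data with
    | nil => exact absurd rfl hne
    | cons a l => simp [PySem.List.pyGet?_zero_cons]
  have hw0 : (0 : Int) ≤ PySem.Str.len ((PySem.List.pyGet? map_data 0).getD "") := by
    simp [PySem.Str.len_eq]
  rw [pvOuter map_data distances _ _ hw0 rfl
    (by
      intro line hline
      rw [hhead]
      simp only [PySem.Str.len_eq]
      exact_mod_cast Int.ofNat_le.mpr (hlines line hline))]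
  exact ((pvRowsB_spec map_data distances _ _ hw0 0).2).symm
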